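-- pv_equiv track=rewrite | github.com/dmt94/algorithms-ds | recursion/bottom-up/exercises.py | add_until_100
-- ===== SOURCE A (Python) =====
-- def add_until_100(arr):
--     if len(arr) == 0:
--         return 0
--
--     sum_of_remaining = add_until_100(arr[1:])
--
--     if arr[0] + sum_of_remaining > 100:
--         return sum_of_remaining
--     else:
--         return arr[0] + sum_of_remaining
-- ===== SOURCE B (Python) =====
-- def add_until_100(arr):
--     total = 0
--     for x in reversed(arr):
--         if total + x <= 100:
--             total += x
--     return total
-- ===== Notes on version B (the rewrite author's own statement) =====
-- stated objective: faster
-- what changed: Replaced the recursion that copies the tail slice at every step with a single reversed iterative pass keeping a running total.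
import Mathlib
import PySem

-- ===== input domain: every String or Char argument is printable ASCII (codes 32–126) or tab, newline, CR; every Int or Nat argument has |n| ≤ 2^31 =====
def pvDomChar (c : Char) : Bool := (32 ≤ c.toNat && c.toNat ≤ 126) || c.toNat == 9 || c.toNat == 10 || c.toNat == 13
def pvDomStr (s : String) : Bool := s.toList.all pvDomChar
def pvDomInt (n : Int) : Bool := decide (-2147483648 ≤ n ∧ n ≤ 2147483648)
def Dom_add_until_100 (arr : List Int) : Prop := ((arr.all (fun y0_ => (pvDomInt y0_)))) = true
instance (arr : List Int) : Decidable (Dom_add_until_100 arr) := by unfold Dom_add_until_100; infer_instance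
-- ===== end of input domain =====

-- B replaces A's tail-slicing recursion with one reversed iterative pass (faster).

-- ===== PORT A =====
def add_until_100 (arr : List Int) : Int :=
  match arr with
  | [] => 0
  | x :: rest =>
    let sum_of_remaining := add_until_100 rest
    if x + sum_of_remaining > 100 then sum_of_remaining
    else x + sum_of_remaining

-- ===== PORT B =====
def add_until_100_alt (arr : List Int) : Int :=
  arr.reverse.foldl (fun total x => if total + x ≤ 100 then total + x else total) 0

-- ===== PRECONDITION & SPEC =====
def Spec_add_until_100 (arr : List Int) (out : Int) : Prop := out = add_until_100_alt arr
instance (arr : List Int) (out : Int) : Decidable (Spec_add_until_100 arr out) := by unfold Spec_add_until_100; infer_instance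

-- ===== CLAIM (what is proved, stated in full; the proofs are below) =====
def Claim_equal_add_until_100 : Prop := ∀ (arr : List Int), Dom_add_until_100 arr → Spec_add_until_100 arr (add_until_100 arr)

-- ===== LEMMAS AND PROOFS =====
theorem add_until_100_alt_eq (arr : List Int) :
    add_until_100_alt arr
      = arr.foldr (fun x total => if total + x ≤ 100 then total + x else total) 0 := by
  simp [add_until_100_alt, List.foldl_reverse]

theorem add_until_100_eq_foldr (arr : List Int) :
    add_until_100 arr
      = arr.foldr (fun x total => if total + x ≤ 100 then total + x else total) 0 := by
  induction arr with
  | nil => simp [add_until_100]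
  | cons x rest ih =>
    simp only [add_until_100, List.foldr, ih]
    split_ifs with h1 h2 h2 <;> omega

-- ===== VERDICT (by name: the statement is the Claim_ definition above) =====
theorem add_until_100_spec : Claim_equal_add_until_100 := by
  intro arr _
  unfold Spec_add_until_100
  rw [add_until_100_eq_foldr, add_until_100_alt_eq]
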